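-- pv_equiv track=rewrite | github.com/yovelkyDS/proyectoTaller2 | game.py | es_isla
-- ===== SOURCE A (Python) =====
-- LIBRE = 0
--
-- VIRUS = 1
--
-- BARRERA = 2
--
-- DIRECCIONES = [(-1,0), (1,0), (0,-1), (0,1)]
--
-- def es_isla(matriz, x, y):
--     """Verifica si poner una barrera en cierta posicion crearia una isla
--
--     Args:
--         matriz (_type_): matriz del juego
--         x (_type_): coordenada x del click del usuario
--         y (_type_): coordenada y del click del usuario
--
--     Returns:
--         _type_: Devuelve True si se crea una isla, False si no
--     """
--     n = len(matriz)
--     temp = [fila[:] for fila in matriz]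
--     temp[x][y] = BARRERA
--
--     # Buscar todas las posiciones LIBRE
--     libres = set((i, j) for i in range(n) for j in range(n) if temp[i][j] == LIBRE)
--     if not libres:
--         return False
--
--     # Buscar todas las posiciones VIRUS
--     virus = set((i, j) for i in range(n) for j in range(n) if temp[i][j] == VIRUS)
--     if not virus:
--         return False  # No hay virus, no puede haber isla
--
--     # BFS desde todas las posiciones de virus para marcar las LIBRE alcanzables
--     visitado = [[False]*n for _ in range(n)]
--     from collections import deque
--     cola = deque()
--     for vx, vy in virus:
--         cola.append((vx, vy))
--         visitado[vx][vy] = True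
--
--     while cola:
--         cx, cy = cola.popleft()
--         for dx, dy in DIRECCIONES:
--             nx, ny = cx+dx, cy+dy
--             if 0 <= nx < n and 0 <= ny < n and not visitado[nx][ny]:
--                 if temp[nx][ny] == LIBRE:
--                     visitado[nx][ny] = True
--                     cola.append((nx, ny))
--                 elif temp[nx][ny] == VIRUS:
--                     visitado[nx][ny] = True  # Marcar virus también
--
--     # Si existe alguna celda LIBRE no visitada, es una isla
--     for i, j in libres:
--         if not visitado[i][j]:
--             return True
--     return False
-- ===== SOURCE B (Python) =====
-- LIBRE = 0
--
-- VIRUS = 1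
--
-- BARRERA = 2
--
-- def es_isla(matriz, x, y):
--     n = len(matriz)
--     temp = [fila[:] for fila in matriz]
--     temp[x][y] = BARRERA
--
--     libres = [(i, j) for i in range(n) for j in range(n) if temp[i][j] == LIBRE]
--     if not libres:
--         return False
--
--     virus = [(i, j) for i in range(n) for j in range(n) if temp[i][j] == VIRUS]
--     if not virus:
--         return False
--
--     # fixed-point label propagation instead of BFS: sweep the grid, marking any
--     # LIBRE cell adjacent to an already-marked cell, until a sweep changes nothing
--     marked = set(virus)
--     changed = True
--     while changed:
--         changed = False
--         for i in range(n):
--             for j in range(n):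
--                 if (i, j) not in marked and temp[i][j] == LIBRE and (
--                         (i - 1, j) in marked or (i + 1, j) in marked
--                         or (i, j - 1) in marked or (i, j + 1) in marked):
--                     marked.add((i, j))
--                     changed = True
--
--     return any(c not in marked for c in libres)
-- ===== Notes on version B (the rewrite author's own statement) =====
-- stated objective: alternative
-- what changed: Replaces the deque-based multi-source BFS over visited flags by a fixed-point label propagation: whole-grid sweeps that mark any LIBRE cell adjacent to a marked cell, repeated until a sweep changes nothing.
import Mathlib
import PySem

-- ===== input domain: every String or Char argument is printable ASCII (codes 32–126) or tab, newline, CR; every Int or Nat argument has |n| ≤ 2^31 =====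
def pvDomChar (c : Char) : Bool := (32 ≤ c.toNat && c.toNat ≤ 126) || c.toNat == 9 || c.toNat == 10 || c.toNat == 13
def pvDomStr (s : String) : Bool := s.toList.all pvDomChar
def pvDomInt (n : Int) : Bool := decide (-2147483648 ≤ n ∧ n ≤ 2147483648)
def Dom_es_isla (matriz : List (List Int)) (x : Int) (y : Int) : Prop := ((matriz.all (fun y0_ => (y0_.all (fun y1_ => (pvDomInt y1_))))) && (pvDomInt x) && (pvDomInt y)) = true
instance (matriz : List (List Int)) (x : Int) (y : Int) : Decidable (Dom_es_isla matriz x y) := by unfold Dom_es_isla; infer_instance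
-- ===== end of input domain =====

-- B replaces A's deque-based multi-source BFS by fixed-point label propagation
-- (whole-grid sweeps until no change); same result, alternative algorithm.


-- ===== PORT A =====
-- shared prologue helpers (both Pythons contain the identical lines
-- 'temp = [fila[:] for fila in matriz]; temp[x][y] = BARRERA' and the two
-- range(n)×range(n) comprehensions)
def pvTemp (matriz : List (List Int)) (x : Int) (y : Int) : List (List Int) :=
  let temp := matriz.map (fun fila => PySem.List.slice fila none none)
  PySem.List.pySetD temp x (PySem.List.pySetD (PySem.List.pyGetD temp x []) y 2)

-- temp[i][j] for 0 ≤ i,j; the default 3 is never O of LIBRE/VIRUS/BARRERA and is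
-- only reachable out of bounds (Pre_ keeps all reads in bounds)
def pvVal (t : List (List Int)) (i j : Int) : Int :=
  (t.getD i.toNat []).getD j.toNat 3

def pvCells (n : Int) : List (Int × Int) :=
  (PySem.List.pyRange 0 n 1).flatMap
    (fun i => (PySem.List.pyRange 0 n 1).map (fun j => (i, j)))

def pvDirs : List (Int × Int) := [(-1, 0), (1, 0), (0, -1), (0, 1)]

-- visitado[i][j]; default true only reachable out of bounds (grid is n×n)
def pvGGet (g : List (List Bool)) (i j : Int) : Bool :=
  (g.getD i.toNat []).getD j.toNat true

def pvGSet (g : List (List Bool)) (i j : Int) (b : Bool) : List (List Bool) :=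
  g.set i.toNat ((g.getD i.toNat []).set j.toNat b)

def pvFalseCount (g : List (List Bool)) : Nat :=
  (g.map (fun r => r.countP (fun b => b = false))).sum

-- one direction of the BFS inner 'for dx, dy in DIRECCIONES' loop body
def pvStepA (t : List (List Int)) (n : Int) (c : Int × Int)
    (st : List (List Bool) × List (Int × Int)) (d : Int × Int) :
    List (List Bool) × List (Int × Int) :=
  if 0 ≤ c.1 + d.1 ∧ c.1 + d.1 < n ∧ 0 ≤ c.2 + d.2 ∧ c.2 + d.2 < n ∧
      pvGGet st.1 (c.1 + d.1) (c.2 + d.2) = false then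
    if pvVal t (c.1 + d.1) (c.2 + d.2) = 0 then
      (pvGSet st.1 (c.1 + d.1) (c.2 + d.2) true, st.2 ++ [(c.1 + d.1, c.2 + d.2)])
    else if pvVal t (c.1 + d.1) (c.2 + d.2) = 1 then
      (pvGSet st.1 (c.1 + d.1) (c.2 + d.2) true, st.2)
    else st
  else st

theorem pvCountP_set_lt (r : List Bool) (b : Nat) (hb : r.getD b true = false) :
    (r.set b true).countP (fun x => x = false) < r.countP (fun x => x = false) := by
  induction r generalizing b with
  | nil => simp [List.getD] at hb
  | cons a rs ih =>
    cases b with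
    | zero =>
      simp only [List.getD_cons_zero] at hb
      subst hb
      simp only [List.set_cons_zero, List.countP_cons]
      simp
    | succ b =>
      have h' : rs.getD b true = false := by
        simpa only [List.getD_cons_succ] using hb
      have := ih b h'
      simp only [List.set_cons_succ, List.countP_cons]
      omega

theorem pvFalseCount_gset (g : List (List Bool)) (i j : Int)
    (h : pvGGet g i j = false) :
    pvFalseCount (pvGSet g i j true) < pvFalseCount g := by
  unfold pvGGet at h
  unfold pvGSet pvFalseCount
  generalize i.toNat = a at *
  generalize j.toNat = b at *
  induction g generalizing a with
  | nil => simp [List.getD] at h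
  | cons r gs ih =>
    cases a with
    | zero =>
      have hb : r.getD b true = false := by
        simpa only [List.getD_cons_zero] using h
      have := pvCountP_set_lt r b hb
      simp only [List.getD_cons_zero, List.set_cons_zero, List.map_cons,
        List.sum_cons]
      omega
    | succ a =>
      have h' : (gs.getD a []).getD b true = false := by
        simpa only [List.getD_cons_succ] using h
      have := ih a h'
      simp only [List.getD_cons_succ, List.set_cons_succ, List.map_cons,
        List.sum_cons]
      omega

theorem pvStepA_measure (t : List (List Int)) (n : Int) (c : Int × Int)
    (st : List (List Bool) × List (Int × Int)) (d : Int × Int) :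
    pvFalseCount (pvStepA t n c st d).1 + (pvStepA t n c st d).2.length ≤
      pvFalseCount st.1 + st.2.length := by
  unfold pvStepA
  split_ifs with h1 h2 h3
  · have := pvFalseCount_gset st.1 (c.1 + d.1) (c.2 + d.2) h1.2.2.2.2
    simp
    omega
  · have := pvFalseCount_gset st.1 (c.1 + d.1) (c.2 + d.2) h1.2.2.2.2
    simp
    omega
  · exact le_refl _
  · exact le_refl _

theorem pvFoldA_measure (t : List (List Int)) (n : Int) (c : Int × Int)
    (ds : List (Int × Int)) (st : List (List Bool) × List (Int × Int)) :
    pvFalseCount (List.foldl (pvStepA t n c) st ds).1 +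
        (List.foldl (pvStepA t n c) st ds).2.length ≤
      pvFalseCount st.1 + st.2.length := by
  induction ds generalizing st with
  | nil => exact le_refl _
  | cons d ds ih =>
    exact le_trans (ih (pvStepA t n c st d)) (pvStepA_measure t n c st d)

def pvBFS (t : List (List Int)) (n : Int) (g : List (List Bool))
    (q : List (Int × Int)) : List (List Bool) :=
  match q with
  | [] => g
  | c :: rest =>
      pvBFS t n (List.foldl (pvStepA t n c) (g, rest) pvDirs).1
        (List.foldl (pvStepA t n c) (g, rest) pvDirs).2
termination_by pvFalseCount g + q.length
decreasing_by
  have h := pvFoldA_measure t n c pvDirs (g, rest)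
  simp only [List.length_cons] at *
  omega

def es_isla (matriz : List (List Int)) (x : Int) (y : Int) : Bool :=
  let n : Int := matriz.length
  let temp := pvTemp matriz x y
  let libres := (pvCells n).filter (fun c => pvVal temp c.1 c.2 = 0)
  if libres = [] then false
  else
    let virus := (pvCells n).filter (fun c => pvVal temp c.1 c.2 = 1)
    if virus = [] then false
    else
      let visit0 : List (List Bool) :=
        List.replicate n.toNat (List.replicate n.toNat false)
      let g0 := virus.foldl (fun g v => pvGSet g v.1 v.2 true) visit0
      let gF := pvBFS temp n g0 virus
      libres.any (fun c => pvGGet gF c.1 c.2 = false)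

-- ===== PORT B =====
-- one whole-grid sweep: fold over all cells, marking unmarked LIBRE cells with a
-- marked neighbour; the Bool records whether the sweep changed anything
def pvSweepStep (t : List (List Int)) (st : List (Int × Int) × Bool)
    (c : Int × Int) : List (Int × Int) × Bool :=
  if c ∉ st.1 ∧ pvVal t c.1 c.2 = 0 ∧
      ((c.1 - 1, c.2) ∈ st.1 ∨ (c.1 + 1, c.2) ∈ st.1 ∨
        (c.1, c.2 - 1) ∈ st.1 ∨ (c.1, c.2 + 1) ∈ st.1) then
    (st.1 ++ [c], true)
  else st

def pvSweep (t : List (List Int)) (n : Int) (m : List (Int × Int)) :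
    List (Int × Int) × Bool :=
  (pvCells n).foldl (pvSweepStep t) (m, false)

theorem pvSweepStep_mono (t : List (List Int)) (st : List (Int × Int) × Bool)
    (a c : Int × Int) (h : c ∈ st.1) : c ∈ (pvSweepStep t st a).1 := by
  unfold pvSweepStep
  split_ifs with h1
  · exact List.mem_append_left _ h
  · exact h

theorem pvSweepFold_mono (t : List (List Int)) (l : List (Int × Int))
    (st : List (Int × Int) × Bool) (c : Int × Int) (h : c ∈ st.1) :
    c ∈ (List.foldl (pvSweepStep t) st l).1 := by
  induction l generalizing st with
  | nil => exact h
  | cons a l ih => exact ih _ (pvSweepStep_mono t st a c h)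

theorem pvSweep_prefix (t : List (List Int)) (n : Int) (m : List (Int × Int)) :
    ∀ c ∈ m, c ∈ (pvSweep t n m).1 := by
  intro c hc
  exact pvSweepFold_mono t (pvCells n) (m, false) c hc

theorem pvSweepFold_true (t : List (List Int)) (l : List (Int × Int)) :
    ∀ st, (List.foldl (pvSweepStep t) st l).2 = true →
      st.2 = true ∨ ∃ c ∈ l, c ∉ st.1 ∧ c ∈ (List.foldl (pvSweepStep t) st l).1 := by
  induction l with
  | nil => intro st h; exact Or.inl h
  | cons a l ih =>
    intro st h
    rcases ih (pvSweepStep t st a) h with h2 | ⟨c, hcl, hcm, hcf⟩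
    · unfold pvSweepStep at h2
      by_cases hfire : a ∉ st.1 ∧ pvVal t a.1 a.2 = 0 ∧
          ((a.1 - 1, a.2) ∈ st.1 ∨ (a.1 + 1, a.2) ∈ st.1 ∨
            (a.1, a.2 - 1) ∈ st.1 ∨ (a.1, a.2 + 1) ∈ st.1)
      · refine Or.inr ⟨a, List.mem_cons_self, hfire.1, ?_⟩
        refine pvSweepFold_mono t l _ a ?_
        simp [pvSweepStep, hfire]
      · rw [if_neg hfire] at h2
        exact Or.inl h2
    · refine Or.inr ⟨c, List.mem_cons_of_mem _ hcl, fun hc => hcm ?_, hcf⟩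
      exact pvSweepStep_mono t st a c hc

theorem pvSweep_true_witness (t : List (List Int)) (n : Int) (m : List (Int × Int))
    (h : (pvSweep t n m).2 = true) :
    ∃ c ∈ pvCells n, c ∉ m ∧ c ∈ (pvSweep t n m).1 := by
  rcases pvSweepFold_true t (pvCells n) (m, false) h with h2 | h2
  · simp at h2
  · exact h2

theorem pvCountP_le {α : Type} (l : List α) (p q : α → Bool)
    (himp : ∀ a ∈ l, p a = true → q a = true) : l.countP p ≤ l.countP q := by
  induction l with
  | nil => simp
  | cons a l ih =>
    have hh := himp a List.mem_cons_self
    have ht := ih (fun b hb => himp b (List.mem_cons_of_mem _ hb))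
    simp only [List.countP_cons]
    by_cases hpa : p a = true
    · simp [hpa, hh hpa]; omega
    · simp [Bool.eq_false_iff.mpr hpa] at *
      split <;> omega

theorem pvCountP_lt {α : Type} (l : List α) (p q : α → Bool)
    (himp : ∀ a ∈ l, p a = true → q a = true)
    (c : α) (hc : c ∈ l) (hq : q c = true) (hp : p c = false) :
    l.countP p < l.countP q := by
  induction l with
  | nil => simp at hc
  | cons a l ih =>
    rcases List.mem_cons.mp hc with rfl | hcl
    · have := pvCountP_le l p q (fun b hb => himp b (List.mem_cons_of_mem _ hb))
      simp only [List.countP_cons, hp, hq]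
      simp
      omega
    · have := ih (fun b hb => himp b (List.mem_cons_of_mem _ hb)) hcl
      have hh := himp a List.mem_cons_self
      simp only [List.countP_cons]
      by_cases hpa : p a = true
      · simp [hpa, hh hpa]; omega
      · simp [Bool.eq_false_iff.mpr hpa] at *
        split <;> omega

def pvLoop (t : List (List Int)) (n : Int) (m : List (Int × Int)) :
    List (Int × Int) :=
  if (pvSweep t n m).2 = true then pvLoop t n (pvSweep t n m).1
  else (pvSweep t n m).1
termination_by ((pvCells n).countP (fun c => decide (c ∉ m)))
decreasing_by
  obtain ⟨c, hcm, hnm, hin⟩ := pvSweep_true_witness t n m (by assumption)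
  exact pvCountP_lt (pvCells n) _ _
    (fun a _ ha => by
      simp only [decide_eq_true_eq] at *
      exact fun h' => ha (pvSweep_prefix t n m a h'))
    c hcm (by simp [hnm]) (by simp [hin])

def es_isla_alt (matriz : List (List Int)) (x : Int) (y : Int) : Bool :=
  let n : Int := matriz.length
  let temp := pvTemp matriz x y
  let libres := (pvCells n).filter (fun c => pvVal temp c.1 c.2 = 0)
  if libres = [] then false
  else
    let virus := (pvCells n).filter (fun c => pvVal temp c.1 c.2 = 1)
    if virus = [] then false
    else
      let mF := pvLoop temp n virus
      libres.any (fun c => c ∉ mF)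

-- ===== PRECONDITION & SPEC =====
-- Pre_ is exactly the set of inputs on which A returns: x a valid (possibly
-- negative) Python index into matriz, y a valid index into that row, and every
-- row at least n long (the n×n comprehensions raise IndexError otherwise).
def pvRowLen (matriz : List (List Int)) (x : Int) : Int :=
  ((matriz.getD (if x < 0 then x + matriz.length else x).toNat []).length : Int)

def Pre_es_isla (matriz : List (List Int)) (x : Int) (y : Int) : Prop :=
  (∀ fila ∈ matriz, matriz.length ≤ fila.length) ∧
  -(matriz.length : Int) ≤ x ∧ x < matriz.length ∧
  -(pvRowLen matriz x) ≤ y ∧ y < pvRowLen matriz x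

instance (matriz : List (List Int)) (x : Int) (y : Int) :
    Decidable (Pre_es_isla matriz x y) := by unfold Pre_es_isla; infer_instance

def pvWitness_es_isla : List (List Int) × Int × Int := ([[1, 0], [0, 0]], 0, 0)

def Spec_es_isla (matriz : List (List Int)) (x : Int) (y : Int) (out : Bool) : Prop := out = es_isla_alt matriz x y
instance (matriz : List (List Int)) (x : Int) (y : Int) (out : Bool) : Decidable (Spec_es_isla matriz x y out) := by unfold Spec_es_isla; infer_instance

-- ===== CLAIM (what is proved, stated in full; the proofs are below) =====
def Claim_equal_es_isla : Prop := ∀ (matriz : List (List Int)) (x : Int) (y : Int), Dom_es_isla matriz x y → Pre_es_isla matriz x y → Spec_es_isla matriz x y (es_isla matriz x y)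

-- ===== LEMMAS AND PROOFS =====

-- cells reachable from a virus cell through LIBRE cells (what both searches compute)
def pvAdj (i j i' j' : Int) : Prop :=
  (i' = i - 1 ∧ j' = j) ∨ (i' = i + 1 ∧ j' = j) ∨
  (i' = i ∧ j' = j - 1) ∨ (i' = i ∧ j' = j + 1)

inductive pvRch (t : List (List Int)) (n : Int) : Int → Int → Prop where
  | virus (i j : Int) : 0 ≤ i → i < n → 0 ≤ j → j < n → pvVal t i j = 1 →
      pvRch t n i j
  | step (i j i' j' : Int) : pvRch t n i j → pvAdj i j i' j' →
      0 ≤ i' → i' < n → 0 ≤ j' → j' < n → pvVal t i' j' = 0 → pvRch t n i' j'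

def pvInB (n : Int) (c : Int × Int) : Prop :=
  0 ≤ c.1 ∧ c.1 < n ∧ 0 ≤ c.2 ∧ c.2 < n

def pvShape (n : Int) (g : List (List Bool)) : Prop :=
  g.length = n.toNat ∧ ∀ r ∈ g, r.length = n.toNat

theorem pvMem_cells (n : Int) (c : Int × Int) : c ∈ pvCells n ↔ pvInB n c := by
  obtain ⟨i, j⟩ := c
  simp only [pvCells, List.mem_flatMap, List.mem_map, PySem.List.mem_pyRange_one,
    pvInB]
  constructor
  · rintro ⟨a, ⟨ha0, ha1⟩, b, ⟨hb0, hb1⟩, he⟩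
    obtain ⟨rfl, rfl⟩ := Prod.mk.injEq .. ▸ he
    simp at he ⊢
    omega
  · rintro ⟨h0, h1, h2, h3⟩
    exact ⟨i, ⟨h0, h1⟩, j, ⟨h2, h3⟩, rfl⟩


theorem pvRch_inb (t : List (List Int)) (n : Int) (i j : Int)
    (h : pvRch t n i j) : pvInB n (i, j) := by
  cases h with
  | virus i j h0 h1 h2 h3 _ => exact ⟨h0, h1, h2, h3⟩
  | step i0 j0 i j _ _ h0 h1 h2 h3 _ => exact ⟨h0, h1, h2, h3⟩

-- ---- grid get/set characterisation ----

theorem pvGetD_set_row (r : List Bool) (b j : Nat) (v : Bool) :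
    (r.set b v).getD j true =
      if j = b ∧ b < r.length then v else r.getD j true := by
  induction r generalizing b j with
  | nil => simp
  | cons a rs ih =>
    cases b with
    | zero =>
      cases j with
      | zero => simp
      | succ j => simp
    | succ b =>
      cases j with
      | zero => simp
      | succ j =>
        simp only [List.set_cons_succ, List.getD_cons_succ, List.length_cons]
        rw [ih]
        have : (j = b ∧ b < rs.length) ↔ (j + 1 = b + 1 ∧ b + 1 < rs.length + 1) := by
          omega
        simp only [this]

theorem pvGetD_set (g : List (List Bool)) (a b : Nat) (v : Bool) (i j : Nat) :
    ((g.set a ((g.getD a []).set b v)).getD i []).getD j true =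
      if i = a ∧ j = b ∧ a < g.length ∧ b < (g.getD a []).length then v
      else (g.getD i []).getD j true := by
  induction g generalizing a i with
  | nil => simp
  | cons r gs ih =>
    cases a with
    | zero =>
      cases i with
      | zero =>
        simp only [List.getD_cons_zero, List.set_cons_zero, List.length_cons]
        rw [pvGetD_set_row]
        have : (j = b ∧ b < r.length) ↔
            ((0 : Nat) = 0 ∧ j = b ∧ 0 < gs.length + 1 ∧ b < r.length) := by
          omega
        simp only [this]
      | succ i =>
        simp only [List.getD_cons_zero, List.set_cons_zero, List.getD_cons_succ]
        have : ¬((i + 1 : Nat) = 0 ∧ j = b ∧ 0 < (r :: gs).length ∧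
            b < r.length) := by
          intro h; omega
        rw [if_neg this]
    | succ a =>
      cases i with
      | zero =>
        simp only [List.getD_cons_succ, List.set_cons_succ, List.getD_cons_zero]
        have : ¬((0 : Nat) = a + 1 ∧ j = b ∧ a + 1 < (r :: gs).length ∧
            b < (gs.getD a []).length) := by
          intro h; omega
        rw [if_neg this]
      | succ i =>
        simp only [List.getD_cons_succ, List.set_cons_succ, List.length_cons]
        rw [ih]
        have : (i = a ∧ j = b ∧ a < gs.length ∧ b < (gs.getD a []).length) ↔
            (i + 1 = a + 1 ∧ j = b ∧ a + 1 < gs.length + 1 ∧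
              b < (gs.getD a []).length) := by
          omega
        simp only [this]

theorem pvGGet_pvGSet (g : List (List Bool)) (a b i j : Int) (v : Bool) :
    pvGGet (pvGSet g a b v) i j =
      if i.toNat = a.toNat ∧ j.toNat = b.toNat ∧ a.toNat < g.length ∧
          b.toNat < (g.getD a.toNat []).length then v
      else pvGGet g i j := by
  unfold pvGGet pvGSet
  exact pvGetD_set g a.toNat b.toNat v i.toNat j.toNat

theorem pvGGet_false_bounds (g : List (List Bool)) (i j : Int)
    (h : pvGGet g i j = false) :
    i.toNat < g.length ∧ j.toNat < (g.getD i.toNat []).length := by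
  unfold pvGGet at h
  by_cases h1 : i.toNat < g.length
  · by_cases h2 : j.toNat < (g.getD i.toNat []).length
    · exact ⟨h1, h2⟩
    · rw [List.getD_eq_default _ _ (by omega)] at h
      simp at h
  · have hrow : g.getD i.toNat [] = [] := List.getD_eq_default _ _ (by omega)
    rw [hrow] at h
    simp [List.getD] at h

theorem pvGGet_mono (g : List (List Bool)) (a b i j : Int)
    (h : pvGGet g i j = true) : pvGGet (pvGSet g a b true) i j = true := by
  rw [pvGGet_pvGSet]
  split_ifs <;> simp [h]

theorem pvGGet_gset_self (g : List (List Bool)) (i j : Int)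
    (h : pvGGet g i j = false) : pvGGet (pvGSet g i j true) i j = true := by
  have hb := pvGGet_false_bounds g i j h
  rw [pvGGet_pvGSet]
  rw [if_pos ⟨rfl, rfl, hb.1, hb.2⟩]

theorem pvGGet_gset_true_iff (g : List (List Bool)) (a b i j : Int)
    (ha : 0 ≤ a) (hb : 0 ≤ b) (hi : 0 ≤ i) (hj : 0 ≤ j)
    (hf : pvGGet g a b = false) :
    pvGGet (pvGSet g a b true) i j = true ↔
      ((i = a ∧ j = b) ∨ pvGGet g i j = true) := by
  have hbd := pvGGet_false_bounds g a b hf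
  rw [pvGGet_pvGSet]
  by_cases hc : i.toNat = a.toNat ∧ j.toNat = b.toNat ∧ a.toNat < g.length ∧
      b.toNat < (g.getD a.toNat []).length
  · rw [if_pos hc]
    simp only [true_iff]
    exact Or.inl ⟨by omega, by omega⟩
  · rw [if_neg hc]
    constructor
    · exact Or.inr
    · rintro (⟨rfl, rfl⟩ | hg)
      · exact absurd ⟨rfl, rfl, hbd.1, hbd.2⟩ hc
      · exact hg

theorem pvShape_gset (n : Int) (g : List (List Bool)) (a b : Int) (v : Bool)
    (h : pvShape n g) : pvShape n (pvGSet g a b v) := by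
  unfold pvGSet
  by_cases hl : g.length ≤ a.toNat
  · rw [List.set_eq_of_length_le hl]; exact h
  · constructor
    · simp [h.1]
    · intro r hr
      rcases List.mem_or_eq_of_mem_set hr with hr | rfl
      · exact h.2 r hr
      · rw [List.length_set]
        rw [List.getD_eq_getElem _ _ (by omega)]
        exact h.2 _ (List.getElem_mem _)

theorem pvGGet_replicate (k : Nat) (i j : Int) (hik : i.toNat < k)
    (hjk : j.toNat < k) :
    pvGGet (List.replicate k (List.replicate k false)) i j = false := by
  unfold pvGGet
  have h1 : (List.replicate k (List.replicate k false)).getD i.toNat [] =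
      List.replicate k false := by
    rw [List.getD_eq_getElem _ _ (by simpa using hik)]
    exact List.getElem_replicate _
  rw [h1]
  rw [List.getD_eq_getElem _ _ (by simpa using hjk)]
  exact List.getElem_replicate _

-- ---- marking the initial virus cells ----

theorem pvMarkFold (n : Int) (vs : List (Int × Int))
    (hvs : ∀ v ∈ vs, pvInB n v) :
    ∀ g, pvShape n g →
      pvShape n (vs.foldl (fun g v => pvGSet g v.1 v.2 true) g) ∧
      ∀ i j : Int, pvInB n (i, j) →
        (pvGGet (vs.foldl (fun g v => pvGSet g v.1 v.2 true) g) i j = true ↔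
          (pvGGet g i j = true ∨ (i, j) ∈ vs)) := by
  induction vs with
  | nil => intro g hg; exact ⟨hg, fun i j _ => by simp⟩
  | cons v vs ih =>
    intro g hg
    have hv := hvs v List.mem_cons_self
    have hsh' := pvShape_gset n g v.1 v.2 true hg
    have ihh := ih (fun w hw => hvs w (List.mem_cons_of_mem _ hw)) _ hsh'
    refine ⟨ihh.1, ?_⟩
    intro i j hij
    simp only [List.foldl_cons]
    rw [ihh.2 i j hij]
    by_cases hgv : pvGGet g v.1 v.2 = false
    · rw [pvGGet_gset_true_iff g v.1 v.2 i j hv.1 hv.2.2.1 hij.1 hij.2.2.1 hgv]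
      constructor
      · rintro ((⟨rfl, rfl⟩ | hg1) | hm)
        · exact Or.inr List.mem_cons_self
        · exact Or.inl hg1
        · exact Or.inr (List.mem_cons_of_mem _ hm)
      · rintro (hg1 | hm)
        · exact Or.inl (Or.inr hg1)
        · rcases List.mem_cons.mp hm with rfl | hm
          · exact Or.inl (Or.inl ⟨rfl, rfl⟩)
          · exact Or.inr hm
    · have hgv' : pvGGet g v.1 v.2 = true := by
        cases h : pvGGet g v.1 v.2
        · exact absurd h hgv
        · rfl
      constructor
      · rintro (hg1 | hm)
        · rw [pvGGet_pvGSet] at hg1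
          split_ifs at hg1 with hc
          · have : i = v.1 ∧ j = v.2 := by
              have ha : (0 : Int) ≤ i := hij.1
              have hcc : (0 : Int) ≤ j := hij.2.2.1
              have he : (0 : Int) ≤ v.1 := hv.1
              have hg2 : (0 : Int) ≤ v.2 := hv.2.2.1
              obtain ⟨h1, h2, h3, h4⟩ := hc
              constructor <;> omega
            obtain ⟨rfl, rfl⟩ := this
            exact Or.inl hgv'
          · exact Or.inl hg1
        · exact Or.inr (List.mem_cons_of_mem _ hm)
      · rintro (hg1 | hm)
        · exact Or.inl (pvGGet_mono g v.1 v.2 i j hg1)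
        · rcases List.mem_cons.mp hm with rfl | hm
          · exact Or.inl (pvGGet_mono g _ _ _ _ hgv')
          · exact Or.inr hm

-- ---- A-side BFS invariant ----

def pvClosedAt (t : List (List Int)) (n : Int) (g : List (List Bool))
    (i j : Int) : Prop :=
  ∀ i' j', pvAdj i j i' j' → pvInB n (i', j') → pvVal t i' j' = 0 →
    pvGGet g i' j' = true

def pvInvA (t : List (List Int)) (n : Int) (g : List (List Bool))
    (q : List (Int × Int)) : Prop :=
  pvShape n g ∧
  (∀ c ∈ q, pvInB n c ∧ pvGGet g c.1 c.2 = true) ∧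
  (∀ i j, pvInB n (i, j) → pvVal t i j = 1 → pvGGet g i j = true) ∧
  (∀ i j, pvInB n (i, j) → pvGGet g i j = true → pvRch t n i j) ∧
  (∀ i j, pvInB n (i, j) → pvGGet g i j = true →
    (i, j) ∈ q ∨ pvClosedAt t n g i j)

theorem pvStepA_cases (t : List (List Int)) (n : Int) (c : Int × Int)
    (st : List (List Bool) × List (Int × Int)) (d : Int × Int)
    (h3 : ∀ i j, pvInB n (i, j) → pvVal t i j = 1 → pvGGet st.1 i j = true) :
    pvStepA t n c st d = st ∨
    (pvInB n (c.1 + d.1, c.2 + d.2) ∧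
      pvGGet st.1 (c.1 + d.1) (c.2 + d.2) = false ∧
      pvVal t (c.1 + d.1) (c.2 + d.2) = 0 ∧
      pvStepA t n c st d =
        (pvGSet st.1 (c.1 + d.1) (c.2 + d.2) true,
          st.2 ++ [(c.1 + d.1, c.2 + d.2)])) := by
  unfold pvStepA
  split_ifs with h1 h2 h4
  · exact Or.inr ⟨⟨h1.1, h1.2.1, h1.2.2.1, h1.2.2.2.1⟩, h1.2.2.2.2, h2, rfl⟩
  · exfalso
    have := h3 (c.1 + d.1) (c.2 + d.2) ⟨h1.1, h1.2.1, h1.2.2.1, h1.2.2.2.1⟩ h4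
    rw [h1.2.2.2.2] at this
    exact absurd this (by simp)
  · exact Or.inl rfl
  · exact Or.inl rfl

def pvMidInv (t : List (List Int)) (n : Int) (c : Int × Int)
    (st : List (List Bool) × List (Int × Int)) : Prop :=
  pvShape n st.1 ∧
  (∀ c' ∈ st.2, pvInB n c' ∧ pvGGet st.1 c'.1 c'.2 = true) ∧
  (∀ i j, pvInB n (i, j) → pvVal t i j = 1 → pvGGet st.1 i j = true) ∧
  (∀ i j, pvInB n (i, j) → pvGGet st.1 i j = true → pvRch t n i j) ∧
  (∀ i j, pvInB n (i, j) → pvGGet st.1 i j = true →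
    (i, j) ∈ st.2 ∨ (i, j) = c ∨ pvClosedAt t n st.1 i j)

theorem pvStepA_mid (t : List (List Int)) (n : Int) (c : Int × Int)
    (st : List (List Bool) × List (Int × Int)) (d : Int × Int)
    (hd : d ∈ pvDirs) (hc : pvRch t n c.1 c.2) (h : pvMidInv t n c st) :
    pvMidInv t n c (pvStepA t n c st d) := by
  obtain ⟨hsh, hq, h3, hsd, hcl⟩ := h
  rcases pvStepA_cases t n c st d h3 with he | ⟨hib, hf, hv, he⟩
  · rw [he]; exact ⟨hsh, hq, h3, hsd, hcl⟩
  · have hadj : pvAdj c.1 c.2 (c.1 + d.1) (c.2 + d.2) := by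
      simp only [pvDirs, List.mem_cons, List.not_mem_nil, or_false] at hd
      rcases hd with rfl | rfl | rfl | rfl
      · exact Or.inl ⟨by ring, by ring⟩
      · exact Or.inr (Or.inl ⟨by ring, by ring⟩)
      · exact Or.inr (Or.inr (Or.inl ⟨by ring, by ring⟩))
      · exact Or.inr (Or.inr (Or.inr ⟨by ring, by ring⟩))
    obtain ⟨hb1, hb2, hb3, hb4⟩ := hib
    rw [he]
    have hrch : pvRch t n (c.1 + d.1) (c.2 + d.2) :=
      pvRch.step c.1 c.2 _ _ hc hadj hb1 hb2 hb3 hb4 hv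
    have hget : ∀ i j : Int, pvInB n (i, j) →
        (pvGGet (pvGSet st.1 (c.1 + d.1) (c.2 + d.2) true) i j = true ↔
          ((i = c.1 + d.1 ∧ j = c.2 + d.2) ∨ pvGGet st.1 i j = true)) := by
      intro i j hij
      exact pvGGet_gset_true_iff st.1 _ _ i j hb1 hb3 hij.1 hij.2.2.1 hf
    refine ⟨pvShape_gset n st.1 _ _ true hsh, ?_, ?_, ?_, ?_⟩
    · intro c' hc'
      rcases List.mem_append.mp hc' with hc' | hc'
      · obtain ⟨hi, hg⟩ := hq c' hc'
        exact ⟨hi, pvGGet_mono st.1 _ _ _ _ hg⟩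
      · simp only [List.mem_singleton] at hc'
        subst hc'
        exact ⟨⟨hb1, hb2, hb3, hb4⟩, pvGGet_gset_self st.1 _ _ hf⟩
    · intro i j hij hv1
      exact pvGGet_mono st.1 _ _ _ _ (h3 i j hij hv1)
    · intro i j hij hg
      rcases (hget i j hij).mp hg with ⟨rfl, rfl⟩ | hg
      · exact hrch
      · exact hsd i j hij hg
    · intro i j hij hg
      rcases (hget i j hij).mp hg with ⟨rfl, rfl⟩ | hg
      · exact Or.inl (List.mem_append.mpr (Or.inr List.mem_cons_self))
      · rcases hcl i j hij hg with hm | hm | hm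
        · exact Or.inl (List.mem_append.mpr (Or.inl hm))
        · exact Or.inr (Or.inl hm)
        · refine Or.inr (Or.inr ?_)
          intro i' j' ha hib' hv'
          exact pvGGet_mono st.1 _ _ _ _ (hm i' j' ha hib' hv')

theorem pvStepA_mono_g (t : List (List Int)) (n : Int) (c : Int × Int)
    (st : List (List Bool) × List (Int × Int)) (d : Int × Int)
    (h3 : ∀ i j, pvInB n (i, j) → pvVal t i j = 1 → pvGGet st.1 i j = true)
    (i j : Int) (h : pvGGet st.1 i j = true) :
    pvGGet (pvStepA t n c st d).1 i j = true := by
  rcases pvStepA_cases t n c st d h3 with he | ⟨_, _, _, he⟩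
  · rw [he]; exact h
  · rw [he]; exact pvGGet_mono st.1 _ _ _ _ h

theorem pvStepA_nbr (t : List (List Int)) (n : Int) (c : Int × Int)
    (st : List (List Bool) × List (Int × Int)) (d : Int × Int)
    (hib : pvInB n (c.1 + d.1, c.2 + d.2))
    (hv : pvVal t (c.1 + d.1) (c.2 + d.2) = 0) :
    pvGGet (pvStepA t n c st d).1 (c.1 + d.1) (c.2 + d.2) = true := by
  obtain ⟨hb1, hb2, hb3, hb4⟩ := hib
  unfold pvStepA
  by_cases hg : pvGGet st.1 (c.1 + d.1) (c.2 + d.2) = false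
  · rw [if_pos ⟨hb1, hb2, hb3, hb4, hg⟩, if_pos hv]
    exact pvGGet_gset_self st.1 _ _ hg
  · have hg' : pvGGet st.1 (c.1 + d.1) (c.2 + d.2) = true := by
      cases h : pvGGet st.1 (c.1 + d.1) (c.2 + d.2)
      · exact absurd h hg
      · rfl
    rw [if_neg (fun h => hg h.2.2.2.2)]
    exact hg'

theorem pvIter_inv (t : List (List Int)) (n : Int) (g : List (List Bool))
    (c : Int × Int) (rest : List (Int × Int)) (h : pvInvA t n g (c :: rest)) :
    pvInvA t n (List.foldl (pvStepA t n c) (g, rest) pvDirs).1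
      (List.foldl (pvStepA t n c) (g, rest) pvDirs).2 := by
  obtain ⟨hsh, hq, h3, hsd, hcl⟩ := h
  have hcq := hq c List.mem_cons_self
  have hcr : pvRch t n c.1 c.2 := hsd c.1 c.2 hcq.1 hcq.2
  have hm0 : pvMidInv t n c (g, rest) := by
    refine ⟨hsh, ?_, h3, hsd, ?_⟩
    · intro c' hc'; exact hq c' (List.mem_cons_of_mem _ hc')
    · intro i j hij hg1
      rcases hcl i j hij hg1 with hm | hm
      · rcases List.mem_cons.mp hm with hm | hm
        · exact Or.inr (Or.inl hm)
        · exact Or.inl hm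
      · exact Or.inr (Or.inr hm)
  set s1 := pvStepA t n c (g, rest) (-1, 0) with hs1
  set s2 := pvStepA t n c s1 (1, 0) with hs2
  set s3 := pvStepA t n c s2 (0, -1) with hs3
  set s4 := pvStepA t n c s3 (0, 1) with hs4
  have e : List.foldl (pvStepA t n c) (g, rest) pvDirs = s4 := rfl
  rw [e]
  have hm1 : pvMidInv t n c s1 :=
    pvStepA_mid t n c (g, rest) (-1, 0) (by simp [pvDirs]) hcr hm0
  have hm2 : pvMidInv t n c s2 :=
    pvStepA_mid t n c s1 (1, 0) (by simp [pvDirs]) hcr hm1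
  have hm3 : pvMidInv t n c s3 :=
    pvStepA_mid t n c s2 (0, -1) (by simp [pvDirs]) hcr hm2
  have hm4 : pvMidInv t n c s4 :=
    pvStepA_mid t n c s3 (0, 1) (by simp [pvDirs]) hcr hm3
  have hhead : pvClosedAt t n s4.1 c.1 c.2 := by
    intro i' j' hadj hib' hv'
    rcases hadj with ⟨rfl, rfl⟩ | ⟨rfl, rfl⟩ | ⟨rfl, rfl⟩ | ⟨rfl, rfl⟩
    · have hib2 : pvInB n (c.1 + (-1 : Int), c.2 + (0 : Int)) := by
        obtain ⟨ha, hb, hcx, hdx⟩ := hib'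
        exact ⟨by omega, by omega, by omega, by omega⟩
      have hv2 : pvVal t (c.1 + (-1 : Int)) (c.2 + (0 : Int)) = 0 := by
        simpa only [← sub_eq_add_neg, add_zero] using hv'
      have hb0 : pvGGet s1.1 (c.1 + (-1 : Int)) (c.2 + (0 : Int)) = true :=
        pvStepA_nbr t n c (g, rest) (-1, 0) hib2 hv2
      have hb1 := pvStepA_mono_g t n c s1 (1, 0) hm1.2.2.1 _ _ hb0
      have hb2 := pvStepA_mono_g t n c s2 (0, -1) hm2.2.2.1 _ _ hb1
      have hb3 := pvStepA_mono_g t n c s3 (0, 1) hm3.2.2.1 _ _ hb2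
      simpa only [← sub_eq_add_neg, add_zero] using hb3
    · have hib2 : pvInB n (c.1 + (1 : Int), c.2 + (0 : Int)) := by
        obtain ⟨ha, hb, hcx, hdx⟩ := hib'
        exact ⟨by omega, by omega, by omega, by omega⟩
      have hv2 : pvVal t (c.1 + (1 : Int)) (c.2 + (0 : Int)) = 0 := by
        simpa only [add_zero] using hv'
      have hb0 : pvGGet s2.1 (c.1 + (1 : Int)) (c.2 + (0 : Int)) = true :=
        pvStepA_nbr t n c s1 (1, 0) hib2 hv2
      have hb1 := pvStepA_mono_g t n c s2 (0, -1) hm2.2.2.1 _ _ hb0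
      have hb2 := pvStepA_mono_g t n c s3 (0, 1) hm3.2.2.1 _ _ hb1
      simpa only [add_zero] using hb2
    · have hib2 : pvInB n (c.1 + (0 : Int), c.2 + (-1 : Int)) := by
        obtain ⟨ha, hb, hcx, hdx⟩ := hib'
        exact ⟨by omega, by omega, by omega, by omega⟩
      have hv2 : pvVal t (c.1 + (0 : Int)) (c.2 + (-1 : Int)) = 0 := by
        simpa only [← sub_eq_add_neg, add_zero] using hv'
      have hb0 : pvGGet s3.1 (c.1 + (0 : Int)) (c.2 + (-1 : Int)) = true :=
        pvStepA_nbr t n c s2 (0, -1) hib2 hv2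
      have hb1 := pvStepA_mono_g t n c s3 (0, 1) hm3.2.2.1 _ _ hb0
      simpa only [← sub_eq_add_neg, add_zero] using hb1
    · have hib2 : pvInB n (c.1 + (0 : Int), c.2 + (1 : Int)) := by
        obtain ⟨ha, hb, hcx, hdx⟩ := hib'
        exact ⟨by omega, by omega, by omega, by omega⟩
      have hv2 : pvVal t (c.1 + (0 : Int)) (c.2 + (1 : Int)) = 0 := by
        simpa only [add_zero] using hv'
      have hb0 : pvGGet s4.1 (c.1 + (0 : Int)) (c.2 + (1 : Int)) = true :=
        pvStepA_nbr t n c s3 (0, 1) hib2 hv2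
      simpa only [add_zero] using hb0
  obtain ⟨hsh4, hq4, h34, hsd4, hcl4⟩ := hm4
  refine ⟨hsh4, hq4, h34, hsd4, ?_⟩
  intro i j hij hg4
  rcases hcl4 i j hij hg4 with hm | hm | hm
  · exact Or.inl hm
  · rcases hm with rfl
    exact Or.inr hhead
  · exact Or.inr hm

theorem pvBFS_correct (t : List (List Int)) (n : Int) :
    ∀ g q, pvInvA t n g q → ∀ i j, pvInB n (i, j) →
      (pvGGet (pvBFS t n g q) i j = true ↔ pvRch t n i j) := by
  intro g q
  induction g, q using pvBFS.induct t n with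
  | case1 g =>
    intro hinv i j hij
    rw [pvBFS]
    constructor
    · exact fun hg => hinv.2.2.2.1 i j hij hg
    · intro hr
      induction hr with
      | virus a b h0 h1 h2 h3 hv => exact hinv.2.2.1 a b ⟨h0, h1, h2, h3⟩ hv
      | step a b a' b' hr hadj h0 h1 h2 h3 hv ih =>
        have hcl := hinv.2.2.2.2 a b (pvRch_inb t n a b hr)
          (ih (pvRch_inb t n a b hr))
        rcases hcl with hm | hm
        · simp at hm
        · exact hm a' b' hadj ⟨h0, h1, h2, h3⟩ hv
  | case2 g c rest ih =>
    intro hinv i j hij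
    rw [pvBFS]
    exact ih (pvIter_inv t n g c rest hinv) i j hij

-- ---- B-side fixed-point iteration ----

theorem pvSweepStep_sound (t : List (List Int)) (n : Int)
    (st : List (Int × Int) × Bool) (a : Int × Int) (ha : pvInB n a)
    (h : ∀ c ∈ st.1, pvInB n c ∧ pvRch t n c.1 c.2) :
    ∀ c ∈ (pvSweepStep t st a).1, pvInB n c ∧ pvRch t n c.1 c.2 := by
  unfold pvSweepStep
  split_ifs with hf
  · intro c hc
    rcases List.mem_append.mp hc with hc | hc
    · exact h c hc
    · simp only [List.mem_singleton] at hc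
      subst hc
      refine ⟨ha, ?_⟩
      obtain ⟨hnm, hv, hnb⟩ := hf
      rcases hnb with hb | hb | hb | hb
      · exact pvRch.step (c.1 - 1) c.2 c.1 c.2 (h _ hb).2
          (Or.inr (Or.inl ⟨by ring, rfl⟩)) ha.1 ha.2.1 ha.2.2.1 ha.2.2.2 hv
      · exact pvRch.step (c.1 + 1) c.2 c.1 c.2 (h _ hb).2
          (Or.inl ⟨by ring, rfl⟩) ha.1 ha.2.1 ha.2.2.1 ha.2.2.2 hv
      · exact pvRch.step c.1 (c.2 - 1) c.1 c.2 (h _ hb).2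
          (Or.inr (Or.inr (Or.inr ⟨rfl, by ring⟩))) ha.1 ha.2.1 ha.2.2.1 ha.2.2.2 hv
      · exact pvRch.step c.1 (c.2 + 1) c.1 c.2 (h _ hb).2
          (Or.inr (Or.inr (Or.inl ⟨rfl, by ring⟩))) ha.1 ha.2.1 ha.2.2.1 ha.2.2.2 hv
  · exact h

theorem pvSweepFold_sound (t : List (List Int)) (n : Int) (l : List (Int × Int))
    (hl : ∀ a ∈ l, pvInB n a) :
    ∀ st, (∀ c ∈ st.1, pvInB n c ∧ pvRch t n c.1 c.2) →
      ∀ c ∈ (List.foldl (pvSweepStep t) st l).1, pvInB n c ∧ pvRch t n c.1 c.2 := by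
  induction l with
  | nil => intro st h; exact h
  | cons a l ih =>
    intro st h
    exact ih (fun b hb => hl b (List.mem_cons_of_mem _ hb)) _
      (pvSweepStep_sound t n st a (hl a List.mem_cons_self) h)

theorem pvSweepStep_snd (t : List (List Int)) (st : List (Int × Int) × Bool)
    (a : Int × Int) (h : st.2 = true) : (pvSweepStep t st a).2 = true := by
  unfold pvSweepStep
  split_ifs with hf
  · rfl
  · exact h

theorem pvSweepFold_snd (t : List (List Int)) (l : List (Int × Int)) :
    ∀ st, st.2 = true → (List.foldl (pvSweepStep t) st l).2 = true := by
  induction l with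
  | nil => intro st h; exact h
  | cons a l ih => intro st h; exact ih _ (pvSweepStep_snd t st a h)

theorem pvSweepFold_false (t : List (List Int)) (l : List (Int × Int)) :
    ∀ st, (List.foldl (pvSweepStep t) st l).2 = false →
      List.foldl (pvSweepStep t) st l = st ∧
      ∀ a ∈ l, ¬(a ∉ st.1 ∧ pvVal t a.1 a.2 = 0 ∧
        ((a.1 - 1, a.2) ∈ st.1 ∨ (a.1 + 1, a.2) ∈ st.1 ∨
          (a.1, a.2 - 1) ∈ st.1 ∨ (a.1, a.2 + 1) ∈ st.1)) := by
  induction l with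
  | nil => intro st h; exact ⟨rfl, by simp⟩
  | cons a l ih =>
    intro st h
    simp only [List.foldl_cons] at h ⊢
    by_cases hf : a ∉ st.1 ∧ pvVal t a.1 a.2 = 0 ∧
        ((a.1 - 1, a.2) ∈ st.1 ∨ (a.1 + 1, a.2) ∈ st.1 ∨
          (a.1, a.2 - 1) ∈ st.1 ∨ (a.1, a.2 + 1) ∈ st.1)
    · exfalso
      have h1 : (pvSweepStep t st a).2 = true := by
        unfold pvSweepStep
        rw [if_pos hf]
      have := pvSweepFold_snd t l _ h1
      rw [h] at this
      exact Bool.false_ne_true this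
    · have hst : pvSweepStep t st a = st := by
        unfold pvSweepStep
        rw [if_neg hf]
      rw [hst] at h ⊢
      obtain ⟨h1, h2⟩ := ih st h
      refine ⟨h1, ?_⟩
      intro b hb
      rcases List.mem_cons.mp hb with rfl | hb
      · exact hf
      · exact h2 b hb

theorem pvSweep_false (t : List (List Int)) (n : Int) (m : List (Int × Int))
    (h : (pvSweep t n m).2 = false) :
    (pvSweep t n m).1 = m ∧
    ∀ a ∈ pvCells n, ¬(a ∉ m ∧ pvVal t a.1 a.2 = 0 ∧
      ((a.1 - 1, a.2) ∈ m ∨ (a.1 + 1, a.2) ∈ m ∨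
        (a.1, a.2 - 1) ∈ m ∨ (a.1, a.2 + 1) ∈ m)) := by
  obtain ⟨h1, h2⟩ := pvSweepFold_false t (pvCells n) (m, false) h
  exact ⟨by rw [pvSweep, h1], h2⟩

theorem pvLoop_subset (t : List (List Int)) (n : Int) :
    ∀ m, ∀ c ∈ m, c ∈ pvLoop t n m := by
  intro m
  induction m using pvLoop.induct t n with
  | case1 m hcond ih =>
    rw [pvLoop, if_pos hcond]
    intro c hc
    exact ih c (pvSweep_prefix t n m c hc)
  | case2 m hcond =>
    rw [pvLoop, if_neg hcond]
    exact pvSweep_prefix t n m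

theorem pvLoop_sound (t : List (List Int)) (n : Int) :
    ∀ m, (∀ c ∈ m, pvInB n c ∧ pvRch t n c.1 c.2) →
      ∀ c ∈ pvLoop t n m, pvInB n c ∧ pvRch t n c.1 c.2 := by
  intro m
  induction m using pvLoop.induct t n with
  | case1 m hcond ih =>
    intro h
    rw [pvLoop, if_pos hcond]
    exact ih (pvSweepFold_sound t n (pvCells n)
      (fun a ha => (pvMem_cells n a).mp ha) (m, false) h)
  | case2 m hcond =>
    intro h
    rw [pvLoop, if_neg hcond]
    exact pvSweepFold_sound t n (pvCells n)
      (fun a ha => (pvMem_cells n a).mp ha) (m, false) h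

theorem pvLoop_fix (t : List (List Int)) (n : Int) :
    ∀ m, pvSweep t n (pvLoop t n m) = (pvLoop t n m, false) := by
  intro m
  induction m using pvLoop.induct t n with
  | case1 m hcond ih =>
    rw [pvLoop, if_pos hcond]
    exact ih
  | case2 m hcond =>
    rw [pvLoop, if_neg hcond]
    have hf : (pvSweep t n m).2 = false := by
      cases h : (pvSweep t n m).2
      · rfl
      · exact absurd h hcond
    have h1 := (pvSweep_false t n m hf).1
    rw [h1]
    have : pvSweep t n m = ((pvSweep t n m).1, (pvSweep t n m).2) := rfl
    rw [this, h1, hf]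

theorem pvB_correct (t : List (List Int)) (n : Int) (m0 : List (Int × Int))
    (hm0 : ∀ c, c ∈ m0 ↔ (pvInB n c ∧ pvVal t c.1 c.2 = 1)) :
    ∀ c, pvInB n c → (c ∈ pvLoop t n m0 ↔ pvRch t n c.1 c.2) := by
  have hsound := pvLoop_sound t n m0 (fun c hc => by
    obtain ⟨hib, hv⟩ := (hm0 c).mp hc
    exact ⟨hib, pvRch.virus c.1 c.2 hib.1 hib.2.1 hib.2.2.1 hib.2.2.2 hv⟩)
  have hfix := pvLoop_fix t n m0
  have hfalse := pvSweep_false t n (pvLoop t n m0) (by rw [hfix])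
  have hcomp : ∀ a b, pvRch t n a b → (a, b) ∈ pvLoop t n m0 := by
    intro a b hr
    induction hr with
    | virus a b h0 h1 h2 h3 hv =>
      exact pvLoop_subset t n m0 (a, b) ((hm0 (a, b)).mpr ⟨⟨h0, h1, h2, h3⟩, hv⟩)
    | step a b a' b' hr hadj h0 h1 h2 h3 hv ih =>
      by_contra hnm
      have hcell : (a', b') ∈ pvCells n := (pvMem_cells n _).mpr ⟨h0, h1, h2, h3⟩
      apply hfalse.2 (a', b') hcell
      refine ⟨hnm, hv, ?_⟩
      rcases hadj with ⟨rfl, rfl⟩ | ⟨rfl, rfl⟩ | ⟨rfl, rfl⟩ | ⟨rfl, rfl⟩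
      · refine Or.inr (Or.inl ?_)
        have e : a - 1 + 1 = a := by ring
        show ((a - 1) + 1, b') ∈ pvLoop t n m0
        rw [e]
        exact ih
      · refine Or.inl ?_
        have e : a + 1 - 1 = a := by ring
        show ((a + 1) - 1, b') ∈ pvLoop t n m0
        rw [e]
        exact ih
      · refine Or.inr (Or.inr (Or.inr ?_))
        have e : b - 1 + 1 = b := by ring
        show (a', (b - 1) + 1) ∈ pvLoop t n m0
        rw [e]
        exact ih
      · refine Or.inr (Or.inr (Or.inl ?_))
        have e : b + 1 - 1 = b := by ring
        show (a', (b + 1) - 1) ∈ pvLoop t n m0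
        rw [e]
        exact ih
  intro c hc
  constructor
  · exact fun h => (hsound c h).2
  · intro hr
    have := hcomp c.1 c.2 hr
    simpa using this

-- ---- glue: both ports compute reachability ----

theorem pvAny_congr {α : Type} (l : List α) (p q : α → Bool)
    (h : ∀ c ∈ l, p c = q c) : l.any p = l.any q := by
  induction l with
  | nil => rfl
  | cons a l ih =>
    simp only [List.any_cons]
    rw [h a List.mem_cons_self, ih (fun c hc => h c (List.mem_cons_of_mem _ hc))]

theorem pvCore (t : List (List Int)) (n : Int) (c : Int × Int) (hc : pvInB n c) :
    (pvGGet
        (pvBFS t n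
          (List.foldl (fun g v => pvGSet g v.1 v.2 true)
            (List.replicate n.toNat (List.replicate n.toNat false))
            ((pvCells n).filter (fun c => pvVal t c.1 c.2 = 1)))
          ((pvCells n).filter (fun c => pvVal t c.1 c.2 = 1)))
        c.1 c.2 = true)
      ↔ c ∈ pvLoop t n ((pvCells n).filter (fun c => pvVal t c.1 c.2 = 1)) := by
  set virus := (pvCells n).filter (fun c => decide (pvVal t c.1 c.2 = 1)) with hvir
  have hvchar : ∀ a, a ∈ virus ↔ (pvInB n a ∧ pvVal t a.1 a.2 = 1) := by
    intro a
    rw [hvir, List.mem_filter]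
    simp only [decide_eq_true_eq]
    rw [pvMem_cells]
  have hsh0 : pvShape n (List.replicate n.toNat (List.replicate n.toNat false)) := by
    constructor
    · simp
    · intro r hr
      rw [List.eq_of_mem_replicate hr]
      simp
  have hmark := pvMarkFold n virus (fun v hv => ((hvchar v).mp hv).1) _ hsh0
  have hg0 : ∀ i j : Int, pvInB n (i, j) →
      (pvGGet (List.foldl (fun g v => pvGSet g v.1 v.2 true)
          (List.replicate n.toNat (List.replicate n.toNat false)) virus) i j = true
        ↔ (i, j) ∈ virus) := by
    intro i j hij
    have hfold := hmark.2 i j hij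
    rw [show virus.foldl (fun g v => pvGSet g v.1 v.2 true)
        (List.replicate n.toNat (List.replicate n.toNat false)) =
        List.foldl (fun g v => pvGSet g v.1 v.2 true)
        (List.replicate n.toNat (List.replicate n.toNat false)) virus from rfl] at hfold
    rw [hfold]
    have hro : pvGGet (List.replicate n.toNat (List.replicate n.toNat false)) i j
        = false := by
      obtain ⟨h0, h1, h2, h3⟩ := hij
      exact pvGGet_replicate n.toNat i j (by omega) (by omega)
    rw [hro]
    simp
  have hinv : pvInvA t n
      (List.foldl (fun g v => pvGSet g v.1 v.2 true)
        (List.replicate n.toNat (List.replicate n.toNat false)) virus) virus := by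
    have hsh1 : pvShape n (List.foldl (fun g v => pvGSet g v.1 v.2 true)
        (List.replicate n.toNat (List.replicate n.toNat false)) virus) := hmark.1
    refine ⟨hsh1, ?_, ?_, ?_, ?_⟩
    · intro c' hc'
      have hib := ((hvchar c').mp hc').1
      exact ⟨hib, (hg0 c'.1 c'.2 hib).mpr hc'⟩
    · intro i j hij hv1
      exact (hg0 i j hij).mpr ((hvchar (i, j)).mpr ⟨hij, hv1⟩)
    · intro i j hij hgt
      have hv1 := ((hvchar (i, j)).mp ((hg0 i j hij).mp hgt)).2
      exact pvRch.virus i j hij.1 hij.2.1 hij.2.2.1 hij.2.2.2 hv1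
    · intro i j hij hgt
      exact Or.inl ((hg0 i j hij).mp hgt)
  have hA := pvBFS_correct t n _ virus hinv c.1 c.2 hc
  have hB := pvB_correct t n virus hvchar c hc
  exact hA.trans hB.symm

theorem pvPorts_eq (matriz : List (List Int)) (x : Int) (y : Int) :
    es_isla matriz x y = es_isla_alt matriz x y := by
  simp only [es_isla, es_isla_alt]
  split_ifs with h1 h2
  · rfl
  · rfl
  · apply pvAny_congr
    intro c hcmem
    have hc : pvInB (matriz.length : Int) c :=
      (pvMem_cells _ c).mp (List.mem_filter.mp hcmem).1
    have hiff := pvCore (pvTemp matriz x y) (matriz.length : Int) c hc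
    rw [decide_eq_decide, ← hiff]
    simp

theorem es_isla_spec : Claim_equal_es_isla := by
  intro matriz x y _ _
  unfold Spec_es_isla
  exact pvPorts_eq matriz x y
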